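-- pv_equiv track=rewrite | github.com/katerinacejas/tp-programacion3 | Parte_3_Experimentos.py | generar_tablero
-- ===== SOURCE A (Python) =====
-- def generar_tablero(N):
--     tablero = [[0] * N for _ in range(N)]
--     capas = (N + 1) // 2  # Cantidad de capas
--
--     # Asignación de valores a cada capa
--     for capa in range(capas):
--         if capa == 0:
--             valor_vertice = -2
--             valor_adyacente = -3
--             valor_interno = -4
--         elif capa == 1:
--             valor_vertice = -4
--             valor_adyacente = -6
--             valor_interno = -6
--         else:
--             valor_vertice = -8
--             valor_adyacente = -8
--             valor_interno = -8
--
--         min_coord = capa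
--         max_coord = N - capa - 1
--
--         for i in range(min_coord, max_coord + 1):
--             for j in range(min_coord, max_coord + 1):
--                 if capa == 0:
--                     if (i == min_coord and j == min_coord) or (i == min_coord and j == max_coord) or \
--                             (i == max_coord and j == min_coord) or (i == max_coord and j == max_coord):
--                         tablero[i][j] = valor_vertice
--                     elif (i == min_coord+1 and j in [min_coord, max_coord]) or \
--                             (i == max_coord-1 and j in [min_coord, max_coord]) or \
--                             (j == min_coord+1 and i in [min_coord, max_coord]) or \
--                             (j == max_coord-1 and i in [min_coord, max_coord]):
--                         tablero[i][j] = valor_adyacente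
--                     else:
--                         tablero[i][j] = valor_interno
--                 else:
--                     if (i == min_coord or i == max_coord) and (j == min_coord or j == max_coord):
--                         tablero[i][j] = valor_vertice
--                     elif (i == min_coord or i == max_coord) or (j == min_coord or j == max_coord):
--                         tablero[i][j] = valor_adyacente
--                     else:
--                         tablero[i][j] = valor_interno
--     return tablero
-- ===== SOURCE B (Python) =====
-- def generar_tablero(N):
--     # Compute each cell directly from its layer L = min(i, j, N-1-i, N-1-j): one pass, O(N^2).
--     def valor(i, j):
--         L = min(i, j, N - 1 - i, N - 1 - j)
--         lo, hi = L, N - 1 - L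
--         if L == 0:
--             if (i == lo or i == hi) and (j == lo or j == hi):
--                 return -2
--             if ((i == lo + 1 or i == hi - 1) and (j == lo or j == hi)) or \
--                ((j == lo + 1 or j == hi - 1) and (i == lo or i == hi)):
--                 return -3
--             return -4
--         if L == 1:
--             return -4 if (i == lo or i == hi) and (j == lo or j == hi) else -6
--         return -8
--     return [[valor(i, j) for j in range(N)] for i in range(N)]
-- ===== Notes on version B (the rewrite author's own statement) =====
-- stated objective: faster
-- what changed: Instead of looping over every layer and rewriting the whole sub-square (overwriting inner cells repeatedly), B computes each cell once directly from its layer L = min(i, j, N-1-i, N-1-j) in a single pass over the grid.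
import Mathlib
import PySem

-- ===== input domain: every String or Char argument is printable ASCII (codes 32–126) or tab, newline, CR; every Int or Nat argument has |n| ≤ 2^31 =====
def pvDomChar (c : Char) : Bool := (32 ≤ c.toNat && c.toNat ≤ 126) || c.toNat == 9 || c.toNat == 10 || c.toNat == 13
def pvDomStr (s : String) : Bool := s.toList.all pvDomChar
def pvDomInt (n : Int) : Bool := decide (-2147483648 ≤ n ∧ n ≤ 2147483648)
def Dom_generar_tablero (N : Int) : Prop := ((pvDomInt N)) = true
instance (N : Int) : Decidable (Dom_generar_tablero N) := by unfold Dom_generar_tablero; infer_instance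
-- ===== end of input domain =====

-- B computes each cell once from its layer L = min(i,j,N-1-i,N-1-j) in one pass (O(N^2))
-- instead of A's per-layer rewriting of whole sub-squares (O(N^3)).


-- ===== PORT A =====
-- tablero[i][j] = v  (i, j are always in range and nonnegative at every use in A, so toNat is exact)
def pvSet (t : List (List Int)) (i j : Int) (v : Int) : List (List Int) :=
  t.modify i.toNat (fun row => row.set j.toNat v)

def generar_tablero (N : Int) : List (List Int) :=
  -- tablero = [[0] * N for _ in range(N)]
  let tablero0 := (PySem.List.pyRange 0 N 1).map (fun _ => List.replicate N.toNat (0 : Int))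
  let capas := PySem.Int.floordiv (N + 1) 2
  (PySem.List.pyRange 0 capas 1).foldl (fun tab capa =>
    let vv : Int × Int × Int :=
      if capa = 0 then (-2, -3, -4)
      else if capa = 1 then (-4, -6, -6)
      else (-8, -8, -8)
    let valor_vertice := vv.1
    let valor_adyacente := vv.2.1
    let valor_interno := vv.2.2
    let minc := capa
    let maxc := N - capa - 1
    (PySem.List.pyRange minc (maxc + 1) 1).foldl (fun tab i =>
      (PySem.List.pyRange minc (maxc + 1) 1).foldl (fun tab j =>
        if capa = 0 then
          if (i = minc ∧ j = minc) ∨ (i = minc ∧ j = maxc) ∨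
             (i = maxc ∧ j = minc) ∨ (i = maxc ∧ j = maxc) then
            pvSet tab i j valor_vertice
          else if (i = minc + 1 ∧ (j = minc ∨ j = maxc)) ∨ (i = maxc - 1 ∧ (j = minc ∨ j = maxc)) ∨
                  (j = minc + 1 ∧ (i = minc ∨ i = maxc)) ∨ (j = maxc - 1 ∧ (i = minc ∨ i = maxc)) then
            pvSet tab i j valor_adyacente
          else
            pvSet tab i j valor_interno
        else
          if (i = minc ∨ i = maxc) ∧ (j = minc ∨ j = maxc) then
            pvSet tab i j valor_vertice
          else if (i = minc ∨ i = maxc) ∨ (j = minc ∨ j = maxc) then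
            pvSet tab i j valor_adyacente
          else
            pvSet tab i j valor_interno) tab) tab) tablero0

-- ===== PORT B =====
def pvValor (N i j : Int) : Int :=
  let L := min (min i j) (min (N - 1 - i) (N - 1 - j))
  let lo := L
  let hi := N - 1 - L
  if L = 0 then
    if (i = lo ∨ i = hi) ∧ (j = lo ∨ j = hi) then -2
    else if ((i = lo + 1 ∨ i = hi - 1) ∧ (j = lo ∨ j = hi)) ∨
            ((j = lo + 1 ∨ j = hi - 1) ∧ (i = lo ∨ i = hi)) then -3
    else -4
  else if L = 1 then
    if (i = lo ∨ i = hi) ∧ (j = lo ∨ j = hi) then -4 else -6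
  else -8

def generar_tablero_alt (N : Int) : List (List Int) :=
  (PySem.List.pyRange 0 N 1).map (fun i =>
    (PySem.List.pyRange 0 N 1).map (fun j => pvValor N i j))

-- ===== PRECONDITION & SPEC =====
def Spec_generar_tablero (N : Int) (out : List (List Int)) : Prop := out = generar_tablero_alt N
instance (N : Int) (out : List (List Int)) : Decidable (Spec_generar_tablero N out) := by unfold Spec_generar_tablero; infer_instance

-- ===== CLAIM (what is proved, stated in full; the proofs are below) =====
def Claim_equal_generar_tablero : Prop := ∀ (N : Int), Dom_generar_tablero N → Spec_generar_tablero N (generar_tablero N)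

-- ===== LEMMAS AND PROOFS =====

-- helper: shape of a grid
def pvShaped (n : Nat) (t : List (List Int)) : Prop :=
  t.length = n ∧ ∀ (k : Nat) (h : k < t.length), (t[k]).length = n

-- cell accessor (indices are the nonnegative Int loop variables)
def pvCell (t : List (List Int)) (i j : Int) : Int :=
  (t.getD i.toNat []).getD j.toNat 0

def pvLayer (N i j : Int) : Int :=
  min (min i j) (min (N - 1 - i) (N - 1 - j))

-- the value A's capa-iteration writes at (i, j)
def pvWval (N capa i j : Int) : Int :=
  let minc := capa
  let maxc := N - capa - 1
  if capa = 0 then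
    if (i = minc ∧ j = minc) ∨ (i = minc ∧ j = maxc) ∨
       (i = maxc ∧ j = minc) ∨ (i = maxc ∧ j = maxc) then -2
    else if (i = minc + 1 ∧ (j = minc ∨ j = maxc)) ∨ (i = maxc - 1 ∧ (j = minc ∨ j = maxc)) ∨
            (j = minc + 1 ∧ (i = minc ∨ i = maxc)) ∨ (j = maxc - 1 ∧ (i = minc ∨ i = maxc)) then -3
    else -4
  else if capa = 1 then
    if (i = minc ∨ i = maxc) ∧ (j = minc ∨ j = maxc) then -4 else -6
  else -8

-- A's capa step, cleaned: write pvWval over the whole sub-square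
def pvStep (N : Int) (tab : List (List Int)) (capa : Int) : List (List Int) :=
  (PySem.List.pyRange capa (N - capa - 1 + 1) 1).foldl (fun tab i =>
    (PySem.List.pyRange capa (N - capa - 1 + 1) 1).foldl (fun tab j =>
      pvSet tab i j (pvWval N capa i j)) tab) tab

lemma pvFoldlCongr {α β : Type} {f g : β → α → β} (l : List α) (b : β) (h : f = g) :
    l.foldl f b = l.foldl g b := by rw [h]

lemma generar_tablero_eq_step (N : Int) :
    generar_tablero N =
      (PySem.List.pyRange 0 (PySem.Int.floordiv (N + 1) 2) 1).foldl (pvStep N)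
        ((PySem.List.pyRange 0 N 1).map (fun _ => List.replicate N.toNat (0 : Int))) := by
  simp only [generar_tablero]
  apply pvFoldlCongr
  funext tab capa
  apply pvFoldlCongr
  funext tab i
  apply pvFoldlCongr
  funext tab j
  simp only [pvWval]
  split_ifs <;> rfl

lemma pvShaped_pvSet {n : Nat} {t : List (List Int)} (h : pvShaped n t) (i j : Int) (v : Int) :
    pvShaped n (pvSet t i j v) := by
  obtain ⟨h1, h2⟩ := h
  constructor
  · simpa [pvSet, List.length_modify] using h1
  · intro k hk
    simp only [pvSet, List.length_modify] at hk ⊢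
    rw [List.getElem_modify]
    split
    · rw [List.length_set]; exact h2 k hk
    · exact h2 k hk

lemma pvCell_pvSet {n : Nat} {t : List (List Int)} (h : pvShaped n t)
    {i j i' j' : Int} (hi : 0 ≤ i) (hj : 0 ≤ j) (hin : i < n) (hjn : j < n)
    (hi' : 0 ≤ i') (hj' : 0 ≤ j') (hi'n : i' < n) (hj'n : j' < n) (v : Int) :
    pvCell (pvSet t i j v) i' j' = if i' = i ∧ j' = j then v else pvCell t i' j' := by
  obtain ⟨h1, h2⟩ := h
  have hm : i'.toNat < (t.modify i.toNat (fun row => row.set j.toNat v)).length := by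
    rw [List.length_modify]; omega
  by_cases hii : i' = i
  · subst hii
    have hrow : (t[i'.toNat]'(by omega)).length = n := h2 _ (by omega)
    by_cases hjj : j' = j
    · subst hjj
      rw [if_pos ⟨rfl, rfl⟩]
      unfold pvCell pvSet
      rw [List.getD_eq_getElem _ _ hm, List.getElem_modify, if_pos rfl,
        List.getD_eq_getElem _ _ (by rw [List.length_set]; omega), List.getElem_set, if_pos rfl]
    · rw [if_neg (by tauto)]
      unfold pvCell pvSet
      rw [List.getD_eq_getElem _ _ hm, List.getElem_modify, if_pos rfl,
        List.getD_eq_getElem _ _ (by rw [List.length_set]; omega), List.getElem_set,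
        if_neg (by omega), List.getD_eq_getElem t [] (by omega),
        List.getD_eq_getElem _ _ (by omega)]
  · rw [if_neg (by tauto)]
    unfold pvCell pvSet
    rw [List.getD_eq_getElem _ _ hm, List.getElem_modify, if_neg (by omega),
      List.getD_eq_getElem t [] (by omega)]

lemma pvRowFold_cell {n : Nat} (f : Int → Int) (b i : Int)
    (hi : 0 ≤ i) (hin : i < (n : Int)) (hb : b ≤ (n : Int)) :
    ∀ (k : Nat) (a : Int) (t : List (List Int)), k = (b - a).toNat → 0 ≤ a → pvShaped n t →
    ∀ (i' j' : Int), 0 ≤ i' → 0 ≤ j' → i' < (n : Int) → j' < (n : Int) →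
    pvCell ((PySem.List.pyRange a b 1).foldl (fun t j => pvSet t i j (f j)) t) i' j'
      = if i' = i ∧ a ≤ j' ∧ j' < b then f j' else pvCell t i' j' := by
  intro k
  induction k with
  | zero =>
    intro a t hk ha ht i' j' hi' hj' hi'n hj'n
    have hnil : PySem.List.pyRange a b 1 = [] := PySem.List.pyRange_one_eq_nil (by omega)
    rw [hnil, List.foldl_nil, if_neg (by omega)]
  | succ k ih =>
    intro a t hk ha ht i' j' hi' hj' hi'n hj'n
    have hcons : PySem.List.pyRange a b 1 = a :: PySem.List.pyRange (a + 1) b 1 :=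
      PySem.List.pyRange_one_cons (by omega)
    simp only [hcons, List.foldl_cons]
    have hr := ih (a + 1) (pvSet t i a (f a)) (by omega) (by omega)
      (pvShaped_pvSet ht i a _) i' j' hi' hj' hi'n hj'n
    rw [hr, pvCell_pvSet ht hi ha hin (by omega) hi' hj' hi'n hj'n]
    split_ifs <;> first | rfl | omega | simp_all

lemma pvShaped_foldl {n : Nat} {α : Type} (F : List (List Int) → α → List (List Int))
    (hF : ∀ t x, pvShaped n t → pvShaped n (F t x)) :
    ∀ (l : List α) (t : List (List Int)), pvShaped n t → pvShaped n (l.foldl F t) := by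
  intro l
  induction l with
  | nil => intro t h; exact h
  | cons x xs ih => intro t h; exact ih _ (hF t x h)

lemma pvSquare_cell {n : Nat} (f : Int → Int → Int) (b c d : Int)
    (hb : b ≤ (n : Int)) (hc : 0 ≤ c) (hd : d ≤ (n : Int)) :
    ∀ (k : Nat) (a : Int) (t : List (List Int)), k = (b - a).toNat → 0 ≤ a → pvShaped n t →
    ∀ (i' j' : Int), 0 ≤ i' → 0 ≤ j' → i' < (n : Int) → j' < (n : Int) →
    pvCell ((PySem.List.pyRange a b 1).foldl (fun t i =>
        (PySem.List.pyRange c d 1).foldl (fun t j => pvSet t i j (f i j)) t) t) i' j'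
      = if (a ≤ i' ∧ i' < b) ∧ (c ≤ j' ∧ j' < d) then f i' j' else pvCell t i' j' := by
  intro k
  induction k with
  | zero =>
    intro a t hk ha ht i' j' hi' hj' hi'n hj'n
    have hnil : PySem.List.pyRange a b 1 = [] := PySem.List.pyRange_one_eq_nil (by omega)
    rw [hnil, List.foldl_nil, if_neg (by omega)]
  | succ k ih =>
    intro a t hk ha ht i' j' hi' hj' hi'n hj'n
    have ht1 : pvShaped n ((PySem.List.pyRange c d 1).foldl
        (fun t j => pvSet t a j (f a j)) t) :=
      pvShaped_foldl _ (fun t j htt => pvShaped_pvSet htt a j _) _ t ht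
    have hcons : PySem.List.pyRange a b 1 = a :: PySem.List.pyRange (a + 1) b 1 :=
      PySem.List.pyRange_one_cons (by omega)
    simp only [hcons, List.foldl_cons]
    have hr := ih (a + 1) _ (by omega) (by omega) ht1 i' j' hi' hj' hi'n hj'n
    rw [hr]
    have hrow := pvRowFold_cell (fun j => f a j) d a ha (by omega) hd ((d - c).toNat) c t rfl
      hc ht i' j' hi' hj' hi'n hj'n
    rw [hrow]
    split_ifs <;> first | rfl | omega | simp_all

lemma pvStep_shaped {n : Nat} (N : Int) (capa : Int) {t : List (List Int)} (h : pvShaped n t) :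
    pvShaped n (pvStep N t capa) := by
  refine pvShaped_foldl _ (fun t i ht => ?_) _ t h
  exact pvShaped_foldl _ (fun t j ht => pvShaped_pvSet ht i j _) _ t ht

lemma pvStep_cell {n : Nat} {N : Int} (hn : n = N.toNat) (hN : 0 < N) (capa : Int)
    (hcapa : 0 ≤ capa) {t : List (List Int)} (h : pvShaped n t)
    {i' j' : Int} (hi' : 0 ≤ i') (hj' : 0 ≤ j') (hi'n : i' < (n : Int)) (hj'n : j' < (n : Int)) :
    pvCell (pvStep N t capa) i' j'
      = if capa ≤ pvLayer N i' j' then pvWval N capa i' j' else pvCell t i' j' := by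
  unfold pvStep
  have hs := pvSquare_cell (pvWval N capa) (N - capa - 1 + 1) capa (N - capa - 1 + 1)
    (by omega) hcapa (by omega) ((N - capa - 1 + 1 - capa).toNat) capa t rfl hcapa h
    i' j' hi' hj' hi'n hj'n
  rw [hs, if_congr (by unfold pvLayer; omega :
    ((capa ≤ i' ∧ i' < N - capa - 1 + 1) ∧ (capa ≤ j' ∧ j' < N - capa - 1 + 1)) ↔
      capa ≤ pvLayer N i' j') rfl rfl]

lemma pvShaped_tablero0 (N : Int) :
    pvShaped N.toNat ((PySem.List.pyRange 0 N 1).map (fun _ => List.replicate N.toNat (0 : Int))) := by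
  constructor
  · rw [List.length_map, PySem.List.length_pyRange_one]; omega
  · intro k hk
    rw [List.getElem_map, List.length_replicate]

lemma pvCapaFold_cell {n : Nat} {N : Int} (hn : n = N.toNat) (hN : 0 < N) :
    ∀ (k : Nat) (c : Int), k = c.toNat → 1 ≤ c →
    ∀ (i' j' : Int), 0 ≤ i' → 0 ≤ j' → i' < (n : Int) → j' < (n : Int) →
    pvCell ((PySem.List.pyRange 0 c 1).foldl (pvStep N)
        ((PySem.List.pyRange 0 N 1).map (fun _ => List.replicate N.toNat (0 : Int)))) i' j'
      = pvWval N (min (pvLayer N i' j') (c - 1)) i' j' := by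
  intro k
  induction k with
  | zero => intro c hk hc1 i' j' hi' hj' hi'n hj'n; exfalso; omega
  | succ k ih =>
    intro c hk hc1 i' j' hi' hj' hi'n hj'n
    have hL0 : 0 ≤ pvLayer N i' j' := by unfold pvLayer; omega
    have ht0 : pvShaped n ((PySem.List.pyRange 0 N 1).map
        (fun _ => List.replicate N.toNat (0 : Int))) := by
      rw [hn]; exact pvShaped_tablero0 N
    by_cases hc : c = 1
    · subst hc
      have h01 : PySem.List.pyRange 0 1 1 = 0 :: PySem.List.pyRange (0 + 1) 1 1 :=
        PySem.List.pyRange_one_cons (by omega)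
      have h11 : PySem.List.pyRange (0 + 1) 1 1 = [] := PySem.List.pyRange_one_eq_nil (by omega)
      rw [h01, h11, List.foldl_cons, List.foldl_nil,
        pvStep_cell hn hN 0 le_rfl ht0 hi' hj' hi'n hj'n, if_pos hL0]
      congr 1
      omega
    · have hsr : PySem.List.pyRange 0 (c - 1 + 1) 1 = PySem.List.pyRange 0 (c - 1) 1 ++ [c - 1] :=
        PySem.List.pyRange_one_succ_right (by omega)
      rw [show c = c - 1 + 1 by omega]
      simp only [hsr, List.foldl_append, List.foldl_cons, List.foldl_nil]
      have htp : pvShaped n ((PySem.List.pyRange 0 (c - 1) 1).foldl (pvStep N)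
          ((PySem.List.pyRange 0 N 1).map (fun _ => List.replicate N.toNat (0 : Int)))) :=
        pvShaped_foldl _ (fun t x htt => pvStep_shaped N x htt) _ _ ht0
      rw [pvStep_cell hn hN (c - 1) (by omega) htp hi' hj' hi'n hj'n]
      by_cases hl : c - 1 ≤ pvLayer N i' j'
      · rw [if_pos hl]
        congr 1
        omega
      · rw [if_neg hl, ih (c - 1) (by omega) (by omega) i' j' hi' hj' hi'n hj'n]
        congr 1
        omega

lemma pvLayer_le {N i j : Int} (_hN : 0 < N) (_hi : 0 ≤ i) (_hj : 0 ≤ j) (_hiN : i < N) (_hjN : j < N) :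
    pvLayer N i j ≤ PySem.Int.floordiv (N + 1) 2 - 1 := by
  rw [PySem.Int.floordiv_eq_ediv_of_pos (by norm_num)]
  unfold pvLayer
  omega

lemma pvWval_layer_eq_pvValor (N i j : Int) :
    pvWval N (pvLayer N i j) i j = pvValor N i j := by
  unfold pvWval pvValor pvLayer
  dsimp only
  split_ifs <;> first | rfl | omega

lemma generar_tablero_cell {N : Int} (hN : 0 < N) {i j : Int}
    (hi : 0 ≤ i) (hj : 0 ≤ j) (hiN : i < N) (hjN : j < N) :
    pvCell (generar_tablero N) i j = pvValor N i j := by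
  have hcap : 1 ≤ PySem.Int.floordiv (N + 1) 2 := by
    rw [PySem.Int.floordiv_eq_ediv_of_pos (by norm_num)]
    omega
  have hcf := pvCapaFold_cell (n := N.toNat) rfl hN ((PySem.Int.floordiv (N + 1) 2).toNat)
    (PySem.Int.floordiv (N + 1) 2) rfl hcap i j hi hj (by omega) (by omega)
  rw [generar_tablero_eq_step, hcf,
    show min (pvLayer N i j) (PySem.Int.floordiv (N + 1) 2 - 1) = pvLayer N i j from by
      have := pvLayer_le hN hi hj hiN hjN
      omega]
  exact pvWval_layer_eq_pvValor N i j

lemma generar_tablero_shaped (N : Int) : pvShaped N.toNat (generar_tablero N) := by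
  rw [generar_tablero_eq_step]
  exact pvShaped_foldl _ (fun t c ht => pvStep_shaped N c ht) _ _ (pvShaped_tablero0 N)

-- ===== VERDICT (by name: the statement is the Claim_ definition above) =====
theorem generar_tablero_spec : Claim_equal_generar_tablero := by
  intro N _
  unfold Spec_generar_tablero
  by_cases hN0 : N ≤ 0
  · rw [generar_tablero_eq_step]
    have h1 : PySem.List.pyRange 0 N 1 = [] := PySem.List.pyRange_one_eq_nil (by omega)
    have h2 : PySem.List.pyRange 0 (PySem.Int.floordiv (N + 1) 2) 1 = [] := by
      apply PySem.List.pyRange_one_eq_nil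
      rw [PySem.Int.floordiv_eq_ediv_of_pos (by norm_num)]
      omega
    have hB : generar_tablero_alt N = [] := by
      unfold generar_tablero_alt
      rw [h1, List.map_nil]
    rw [h2, List.foldl_nil, h1, List.map_nil, hB]
  · have hN : 0 < N := by omega
    obtain ⟨hlen, hrow⟩ := generar_tablero_shaped N
    have hBlen : (generar_tablero_alt N).length = N.toNat := by
      simp only [generar_tablero_alt, List.length_map, PySem.List.length_pyRange_one]
      omega
    apply List.ext_getElem
    · rw [hlen, hBlen]
    · intro k h1 h2
      have hk : k < N.toNat := by omega
      have hBrow : (generar_tablero_alt N)[k] =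
          (PySem.List.pyRange 0 N 1).map (fun j => pvValor N ((0 : Int) + (k : Int)) j) := by
        simp only [generar_tablero_alt, List.getElem_map, PySem.List.getElem_pyRange_one]
      apply List.ext_getElem
      · rw [hrow k h1, hBrow, List.length_map, PySem.List.length_pyRange_one]
        omega
      · intro l h3 h4
        have hl : l < N.toNat := by rw [hrow k h1] at h3; omega
        have hAcell : (generar_tablero N)[k][l]
            = pvCell (generar_tablero N) (k : Int) (l : Int) := by
          unfold pvCell
          rw [Int.toNat_natCast, Int.toNat_natCast,
            List.getD_eq_getElem _ _ h1, List.getD_eq_getElem _ _ h3]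
        have hBcell : (generar_tablero_alt N)[k][l]
            = pvValor N ((0 : Int) + (k : Int)) ((0 : Int) + (l : Int)) := by
          simp only [hBrow, List.getElem_map, PySem.List.getElem_pyRange_one]
        rw [hAcell, hBcell,
          generar_tablero_cell hN (by omega) (by omega) (by omega) (by omega)]
        norm_num
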